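-- pv_equiv track=rewrite | github.com/SOHEELEE408/Algorithms | algorithms/dynamicProgramming/excitedFunction.py | w
-- ===== SOURCE A (Python) =====
-- def w(a, b, c):
--     if a<=0 or b<=0 or c<=0:
--         return 1
--
--     elif a>20 or b>20 or c>20:
--         return w(20, 20, 20)
--
--     if dp[a][b][c]:
--          return dp[a][b][c]
--
--     elif a<b and b<c:
--         dp[a][b][c] = w(a, b, c-1) + w(a, b-1, c-1) - w(a, b-1, c)
--
--     else:
--         dp[a][b][c] = w(a-1, b, c)+w(a-1, b-1, c)+w(a-1, b, c-1)-w(a-1, b-1, c-1)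
--
--     return dp[a][b][c]
--
-- dp = [[[0 for _ in range(21)] for _ in range(21)] for _ in range(21)]
-- ===== SOURCE B (Python) =====
-- def _build():
--     t = []
--     for a in range(21):
--         plane = []
--         for b in range(21):
--             row = []
--             for c in range(21):
--                 if a == 0 or b == 0 or c == 0:
--                     row.append(1)
--                 elif a < b and b < c:
--                     row.append(row[c - 1] + plane[b - 1][c - 1] - plane[b - 1][c])
--                 else:
--                     row.append(t[a - 1][b][c] + t[a - 1][b - 1][c]
--                                + t[a - 1][b][c - 1] - t[a - 1][b - 1][c - 1])
--             plane.append(row)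
--         t.append(plane)
--     return t
--
-- _TABLE = _build()
--
-- def w(a, b, c):
--     if a <= 0 or b <= 0 or c <= 0:
--         return 1
--     if a > 20 or b > 20 or c > 20:
--         return _TABLE[20][20][20]
--     return _TABLE[a][b][c]
-- ===== Notes on version B (the rewrite author's own statement) =====
-- stated objective: alternative
-- what changed: Replaces memoized top-down recursion with a single bottom-up iterative fill of the full 21x21x21 table (boundary cells seeded to 1, then a,b,c ascending), after which w is just guards plus a table lookup.
import Mathlib
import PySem

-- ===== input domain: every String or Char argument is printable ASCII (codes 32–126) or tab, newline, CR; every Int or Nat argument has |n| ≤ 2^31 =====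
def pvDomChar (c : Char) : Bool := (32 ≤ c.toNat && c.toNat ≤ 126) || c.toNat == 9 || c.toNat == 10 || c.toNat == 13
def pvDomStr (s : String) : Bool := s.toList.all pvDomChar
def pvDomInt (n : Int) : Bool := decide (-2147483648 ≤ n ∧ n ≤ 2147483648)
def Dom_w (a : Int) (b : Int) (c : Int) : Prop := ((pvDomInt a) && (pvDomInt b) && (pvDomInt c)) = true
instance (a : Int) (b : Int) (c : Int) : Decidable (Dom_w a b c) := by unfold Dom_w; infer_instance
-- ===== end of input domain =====

-- B replaces A's memoized top-down recursion by a bottom-up iterative table fill; same values, alternative decomposition.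

-- ===== PORT A =====
-- A's recursion with its memo table `dp` threaded through explicitly: `dp` is the global
-- mutable 21x21x21 zero-initialised table, modelled as a function (Nat x Nat x Nat) -> Int
-- (assignment dp[a][b][c] = v becomes a pointwise function update); the truthiness test
-- `if dp[a][b][c]:` is `dp k != 0`, exactly Python's rule for an int.
def wGo : Nat → (Nat × Nat × Nat → Int) → Int → Int → Int → Int × (Nat × Nat × Nat → Int)
  | 0, dp, _, _, _ => (0, dp)   -- fuel guard only, never reached: 62 exceeds the call depth on every input
  | fuel + 1, dp, a, b, c =>
    if a ≤ 0 ∨ b ≤ 0 ∨ c ≤ 0 then (1, dp)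
    else if 20 < a ∨ 20 < b ∨ 20 < c then wGo fuel dp 20 20 20
    else
      let k := (a.toNat, b.toNat, c.toNat)
      if dp k ≠ 0 then (dp k, dp)
      else if a < b ∧ b < c then
        let p1 := wGo fuel dp a b (c - 1)
        let p2 := wGo fuel p1.2 a (b - 1) (c - 1)
        let p3 := wGo fuel p2.2 a (b - 1) c
        let v := p1.1 + p2.1 - p3.1
        (v, fun k' => if k' = k then v else p3.2 k')
      else
        let p1 := wGo fuel dp (a - 1) b c
        let p2 := wGo fuel p1.2 (a - 1) (b - 1) c
        let p3 := wGo fuel p2.2 (a - 1) b (c - 1)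
        let p4 := wGo fuel p3.2 (a - 1) (b - 1) (c - 1)
        let v := p1.1 + p2.1 + p3.1 - p4.1
        (v, fun k' => if k' = k then v else p4.2 k')

def w (a : Int) (b : Int) (c : Int) : Int := (wGo 62 (fun _ => 0) a b c).1

-- ===== PORT B =====
-- list indexing helpers: in B every index is in range, so getD's default is never used
def pvGet2 (p : List (List Int)) (b c : Nat) : Int := (p.getD b []).getD c 0
def pvGet3 (t : List (List (List Int))) (a b c : Nat) : Int := ((t.getD a []).getD b []).getD c 0

-- inner `for c in range(21)` loop of _build (fuel = remaining iterations)
def rowLoop (t : List (List (List Int))) (plane : List (List Int)) (a b : Nat)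
    (row : List Int) (c : Nat) : Nat → List Int
  | 0 => row
  | fuel + 1 =>
    let v : Int :=
      if a = 0 ∨ b = 0 ∨ c = 0 then 1
      else if a < b ∧ b < c then
        row.getD (c - 1) 0 + pvGet2 plane (b - 1) (c - 1) - pvGet2 plane (b - 1) c
      else
        pvGet3 t (a - 1) b c + pvGet3 t (a - 1) (b - 1) c
          + pvGet3 t (a - 1) b (c - 1) - pvGet3 t (a - 1) (b - 1) (c - 1)
    rowLoop t plane a b (row ++ [v]) (c + 1) fuel

-- middle `for b in range(21)` loop of _build
def planeLoop (t : List (List (List Int))) (a : Nat) (plane : List (List Int)) (b : Nat) :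
    Nat → List (List Int)
  | 0 => plane
  | fuel + 1 => planeLoop t a (plane ++ [rowLoop t plane a b [] 0 21]) (b + 1) fuel

-- outer `for a in range(21)` loop of _build
def tableLoop (t : List (List (List Int))) (a : Nat) : Nat → List (List (List Int))
  | 0 => t
  | fuel + 1 => tableLoop (t ++ [planeLoop t a [] 0 21]) (a + 1) fuel

def wTable : List (List (List Int)) := tableLoop [] 0 21

def w_alt (a : Int) (b : Int) (c : Int) : Int :=
  if a ≤ 0 ∨ b ≤ 0 ∨ c ≤ 0 then 1
  else if 20 < a ∨ 20 < b ∨ 20 < c then pvGet3 wTable 20 20 20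
  else pvGet3 wTable a.toNat b.toNat c.toNat

-- ===== PRECONDITION & SPEC =====
def Spec_w (a : Int) (b : Int) (c : Int) (out : Int) : Prop := out = w_alt a b c
instance (a : Int) (b : Int) (c : Int) (out : Int) : Decidable (Spec_w a b c out) := by unfold Spec_w; infer_instance

-- ===== CLAIM (what is proved, stated in full; the proofs are below) =====
def Claim_equal_w : Prop := ∀ (a : Int) (b : Int) (c : Int), Dom_w a b c → Spec_w a b c (w a b c)

-- ===== LEMMAS AND PROOFS =====

-- pure mathematical recurrence both programs compute (proof-only helper)
def Wn (a b c : Nat) : Int :=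
  if a = 0 ∨ b = 0 ∨ c = 0 then 1
  else if a < b ∧ b < c then
    Wn a b (c - 1) + Wn a (b - 1) (c - 1) - Wn a (b - 1) c
  else
    Wn (a - 1) b c + Wn (a - 1) (b - 1) c + Wn (a - 1) b (c - 1) - Wn (a - 1) (b - 1) (c - 1)
termination_by a + b + c
decreasing_by all_goals omega

-- a plane of wTable is correct up to row m: rows 0..m-1 present, each of length 21, values Wn
def PlaneOK (a : Nat) (plane : List (List Int)) (m : Nat) : Prop :=
  plane.length = m ∧ ∀ b < m, (plane.getD b []).length = 21 ∧ ∀ c < 21, pvGet2 plane b c = Wn a b c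

def TableOK (t : List (List (List Int))) (m : Nat) : Prop :=
  t.length = m ∧ ∀ a < m, PlaneOK a (t.getD a []) 21

-- value appended at position c is Wn a b c, given correct prefix/plane/previous plane
lemma rowLoop_ok (t : List (List (List Int))) (plane : List (List Int)) (a b : Nat)
    (hb21 : b < 21)
    (hP : PlaneOK a plane b) (hT : 1 ≤ a → PlaneOK (a - 1) (t.getD (a - 1) []) 21) :
    ∀ (fuel c : Nat) (row : List Int), c + fuel ≤ 21 → row.length = c →
      (∀ i < c, row.getD i 0 = Wn a b i) →
      (rowLoop t plane a b row c fuel).length = c + fuel ∧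
        ∀ i < c + fuel, (rowLoop t plane a b row c fuel).getD i 0 = Wn a b i := by
  intro fuel
  induction fuel with
  | zero =>
    intro c row _ hlen hvals
    simpa [rowLoop, hlen] using hvals
  | succ n ih =>
    intro c row hle hlen hvals
    have hc21 : c < 21 := by omega
    -- the value computed this iteration equals Wn a b c
    have hv : (if a = 0 ∨ b = 0 ∨ c = 0 then (1 : Int)
        else if a < b ∧ b < c then
          row.getD (c - 1) 0 + pvGet2 plane (b - 1) (c - 1) - pvGet2 plane (b - 1) c
        else
          pvGet3 t (a - 1) b c + pvGet3 t (a - 1) (b - 1) c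
            + pvGet3 t (a - 1) b (c - 1) - pvGet3 t (a - 1) (b - 1) (c - 1)) = Wn a b c := by
      by_cases hz : a = 0 ∨ b = 0 ∨ c = 0
      · rw [if_pos hz, Wn, if_pos hz]
      · rw [if_neg hz, Wn, if_neg hz]
        by_cases hlt : a < b ∧ b < c
        · rw [if_pos hlt, if_pos hlt]
          obtain ⟨-, hPb⟩ := hP
          obtain ⟨-, hrow⟩ := hPb (b - 1) (by omega)
          rw [hvals (c - 1) (by omega), hrow (c - 1) (by omega), hrow c hc21]
        · rw [if_neg hlt, if_neg hlt]
          obtain ⟨-, hprev⟩ := hT (by omega)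
          have g : ∀ b' c', b' < 21 → c' < 21 → pvGet3 t (a - 1) b' c' = Wn (a - 1) b' c' :=
            fun b' c' hb' hc' => (hprev b' hb').2 c' hc'
          rw [g b c hb21 hc21, g (b - 1) c (by omega) hc21, g b (c - 1) hb21 (by omega),
            g (b - 1) (c - 1) (by omega) (by omega)]
    have hstep := ih (c + 1) (row ++ [Wn a b c]) (by omega)
      (by simp [hlen])
      (by
        intro i hi
        rcases Nat.lt_succ_iff_lt_or_eq.mp hi with h | h
        · rw [List.getD_append row [Wn a b c] 0 i (by omega)]
          exact hvals i h
        · rw [h, List.getD_append_right row [Wn a b c] 0 c (by omega)]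
          simp [hlen])
    rw [rowLoop]
    simp only [hv]
    refine ⟨by rw [hstep.1]; omega, fun i hi => hstep.2 i (by omega)⟩

lemma planeLoop_ok (t : List (List (List Int))) (a : Nat)
    (hT : 1 ≤ a → PlaneOK (a - 1) (t.getD (a - 1) []) 21) :
    ∀ (fuel b : Nat) (plane : List (List Int)), b + fuel ≤ 21 → PlaneOK a plane b →
      PlaneOK a (planeLoop t a plane b fuel) (b + fuel) := by
  intro fuel
  induction fuel with
  | zero => intro b plane _ hP; simpa [planeLoop] using hP
  | succ n ih =>
    intro b plane hle hP
    have hrow := rowLoop_ok t plane a b (by omega) hP hT 21 0 [] (by omega) rfl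
      (by intro i hi; omega)
    rw [planeLoop]
    have hP' : PlaneOK a (plane ++ [rowLoop t plane a b [] 0 21]) (b + 1) := by
      obtain ⟨hlen, hrows⟩ := hP
      refine ⟨by simp [hlen], ?_⟩
      intro b' hb'
      rcases Nat.lt_succ_iff_lt_or_eq.mp hb' with h | h
      · have e : (plane ++ [rowLoop t plane a b [] 0 21]).getD b' [] = plane.getD b' [] :=
          List.getD_append plane [rowLoop t plane a b [] 0 21] [] b' (by omega)
        obtain ⟨h1, h2⟩ := hrows b' h
        exact ⟨by rw [e]; exact h1, by intro c hc; rw [pvGet2, e]; exact h2 c hc⟩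
      · rw [h]
        have e : (plane ++ [rowLoop t plane a b [] 0 21]).getD b [] =
            rowLoop t plane a b [] 0 21 := by
          rw [List.getD_append_right plane [rowLoop t plane a b [] 0 21] [] b (by omega)]
          simp [hlen]
        refine ⟨by rw [e]; exact hrow.1, ?_⟩
        intro c hc
        rw [pvGet2, e]
        exact hrow.2 c hc
    have e21 : b + (n + 1) = (b + 1) + n := by omega
    rw [e21]
    exact ih (b + 1) _ (by omega) hP'

lemma tableLoop_ok :
    ∀ (fuel a : Nat) (t : List (List (List Int))), a + fuel ≤ 21 → TableOK t a →
      TableOK (tableLoop t a fuel) (a + fuel) := by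
  intro fuel
  induction fuel with
  | zero => intro a t _ hT; simpa [tableLoop] using hT
  | succ n ih =>
    intro a t hle hT
    obtain ⟨hlen, hplanes⟩ := hT
    have hTprev : 1 ≤ a → PlaneOK (a - 1) (t.getD (a - 1) []) 21 := fun h =>
      hplanes (a - 1) (by omega)
    have hnew : PlaneOK a (planeLoop t a [] 0 21) 21 :=
      planeLoop_ok t a hTprev 21 0 [] (by omega) ⟨rfl, by intro b hb; omega⟩
    rw [tableLoop]
    have hT' : TableOK (t ++ [planeLoop t a [] 0 21]) (a + 1) := by
      refine ⟨by simp [hlen], ?_⟩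
      intro a' ha'
      rcases Nat.lt_succ_iff_lt_or_eq.mp ha' with h | h
      · have e : (t ++ [planeLoop t a [] 0 21]).getD a' [] = t.getD a' [] :=
          List.getD_append t [planeLoop t a [] 0 21] [] a' (by omega)
        rw [e]; exact hplanes a' h
      · rw [h]
        have e : (t ++ [planeLoop t a [] 0 21]).getD a [] = planeLoop t a [] 0 21 := by
          rw [List.getD_append_right t [planeLoop t a [] 0 21] [] a (by omega)]
          simp [hlen]
        rw [e]; exact hnew
    have e21 : a + (n + 1) = (a + 1) + n := by omega
    rw [e21]
    exact ih (a + 1) _ (by omega) hT'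

lemma wTable_ok : TableOK wTable 21 :=
  tableLoop_ok 21 0 [] (by omega) ⟨rfl, by intro a ha; omega⟩

lemma get3_wTable (a b c : Nat) (ha : a < 21) (hb : b < 21) (hc : c < 21) :
    pvGet3 wTable a b c = Wn a b c := by
  obtain ⟨-, hplanes⟩ := wTable_ok
  exact (hplanes a ha).2 b hb |>.2 c hc

-- what a top-level call returns, as a pure function of the arguments (proof-only helper)
def WI (a b c : Int) : Int :=
  if a ≤ 0 ∨ b ≤ 0 ∨ c ≤ 0 then 1
  else if 20 < a ∨ 20 < b ∨ 20 < c then Wn 20 20 20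
  else Wn a.toNat b.toNat c.toNat

-- memo-table invariant: every nonzero entry is the true value at its key
def InvDp (dp : Nat × Nat × Nat → Int) : Prop :=
  ∀ k, dp k ≠ 0 → dp k = Wn k.1 k.2.1 k.2.2

lemma WI_interior (a b c : Int) (h1 : ¬(a ≤ 0 ∨ b ≤ 0 ∨ c ≤ 0))
    (h2 : ¬(20 < a ∨ 20 < b ∨ 20 < c)) : WI a b c = Wn a.toNat b.toNat c.toNat := by
  rw [WI, if_neg h1, if_neg h2]

lemma WI_eq_Wn (a b c : Int) (ha : 0 ≤ a) (hb : 0 ≤ b) (hc : 0 ≤ c)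
    (ha' : a ≤ 20) (hb' : b ≤ 20) (hc' : c ≤ 20) :
    WI a b c = Wn a.toNat b.toNat c.toNat := by
  by_cases hz : a ≤ 0 ∨ b ≤ 0 ∨ c ≤ 0
  · rw [WI, if_pos hz, Wn, if_pos (by omega)]
  · exact WI_interior a b c hz (by omega)

lemma WI_branch1 (a b c : Int) (h1 : ¬(a ≤ 0 ∨ b ≤ 0 ∨ c ≤ 0))
    (h2 : ¬(20 < a ∨ 20 < b ∨ 20 < c)) (hlt : a < b ∧ b < c) :
    WI a b c = WI a b (c - 1) + WI a (b - 1) (c - 1) - WI a (b - 1) c := by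
  rw [WI_interior a b c h1 h2,
    WI_eq_Wn a b (c - 1) (by omega) (by omega) (by omega) (by omega) (by omega) (by omega),
    WI_eq_Wn a (b - 1) (c - 1) (by omega) (by omega) (by omega) (by omega) (by omega) (by omega),
    WI_eq_Wn a (b - 1) c (by omega) (by omega) (by omega) (by omega) (by omega) (by omega),
    show (c - 1).toNat = c.toNat - 1 by omega, show (b - 1).toNat = b.toNat - 1 by omega, Wn,
    if_neg (show ¬(a.toNat = 0 ∨ b.toNat = 0 ∨ c.toNat = 0) by omega),
    if_pos (show a.toNat < b.toNat ∧ b.toNat < c.toNat by omega)]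

lemma WI_branch2 (a b c : Int) (h1 : ¬(a ≤ 0 ∨ b ≤ 0 ∨ c ≤ 0))
    (h2 : ¬(20 < a ∨ 20 < b ∨ 20 < c)) (hlt : ¬(a < b ∧ b < c)) :
    WI a b c = WI (a - 1) b c + WI (a - 1) (b - 1) c + WI (a - 1) b (c - 1)
      - WI (a - 1) (b - 1) (c - 1) := by
  rw [WI_interior a b c h1 h2,
    WI_eq_Wn (a - 1) b c (by omega) (by omega) (by omega) (by omega) (by omega) (by omega),
    WI_eq_Wn (a - 1) (b - 1) c (by omega) (by omega) (by omega) (by omega) (by omega) (by omega),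
    WI_eq_Wn (a - 1) b (c - 1) (by omega) (by omega) (by omega) (by omega) (by omega) (by omega),
    WI_eq_Wn (a - 1) (b - 1) (c - 1) (by omega) (by omega) (by omega) (by omega) (by omega)
      (by omega),
    show (a - 1).toNat = a.toNat - 1 by omega, show (b - 1).toNat = b.toNat - 1 by omega,
    show (c - 1).toNat = c.toNat - 1 by omega, Wn,
    if_neg (show ¬(a.toNat = 0 ∨ b.toNat = 0 ∨ c.toNat = 0) by omega),
    if_neg (show ¬(a.toNat < b.toNat ∧ b.toNat < c.toNat) by omega)]

lemma wGo_ok : ∀ (fuel : Nat) (dp : Nat × Nat × Nat → Int) (a b c : Int),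
    (if 20 < a ∨ 20 < b ∨ 20 < c then 61 else (a + b + c).toNat) < fuel → InvDp dp →
    (wGo fuel dp a b c).1 = WI a b c ∧ InvDp (wGo fuel dp a b c).2 := by
  intro fuel
  induction fuel with
  | zero =>
    intro dp a b c hm hInv
    split_ifs at hm <;> omega
  | succ n ih =>
    intro dp a b c hm hInv
    by_cases hz : a ≤ 0 ∨ b ≤ 0 ∨ c ≤ 0
    · rw [wGo, if_pos hz]
      exact ⟨by rw [WI, if_pos hz], hInv⟩
    · by_cases h20 : 20 < a ∨ 20 < b ∨ 20 < c
      · rw [wGo, if_neg hz, if_pos h20]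
        have h := ih dp 20 20 20 (by split_ifs at hm ⊢ <;> omega) hInv
        refine ⟨?_, h.2⟩
        rw [h.1, show WI 20 20 20 = Wn 20 20 20 from by
            rw [WI, if_neg (by omega), if_neg (by omega)]; rfl,
          WI, if_neg hz, if_pos h20]
      · rw [wGo, if_neg hz, if_neg h20]
        simp only []
        by_cases hk : dp (a.toNat, b.toNat, c.toNat) ≠ 0
        · rw [if_pos hk]
          refine ⟨?_, hInv⟩
          rw [hInv _ hk, WI_interior a b c hz h20]
        · rw [if_neg hk]
          by_cases hlt : a < b ∧ b < c
          · rw [if_pos hlt]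
            have h1 := ih dp a b (c - 1) (by split_ifs at hm ⊢ <;> omega) hInv
            have h2 := ih (wGo n dp a b (c - 1)).2 a (b - 1) (c - 1)
              (by split_ifs at hm ⊢ <;> omega) h1.2
            have h3 := ih (wGo n (wGo n dp a b (c - 1)).2 a (b - 1) (c - 1)).2 a (b - 1) c
              (by split_ifs at hm ⊢ <;> omega) h2.2
            have hv : (wGo n dp a b (c - 1)).1
                + (wGo n (wGo n dp a b (c - 1)).2 a (b - 1) (c - 1)).1
                - (wGo n (wGo n (wGo n dp a b (c - 1)).2 a (b - 1) (c - 1)).2 a (b - 1) c).1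
                = WI a b c := by
              rw [h1.1, h2.1, h3.1, WI_branch1 a b c hz h20 hlt]
            refine ⟨hv, ?_⟩
            intro k' hk'
            by_cases hkk : k' = (a.toNat, b.toNat, c.toNat)
            · simp only [hkk, if_true] at hk' ⊢
              rw [hv, WI_interior a b c hz h20]
            · simp only [if_neg hkk] at hk' ⊢
              exact h3.2 k' hk'
          · rw [if_neg hlt]
            have h1 := ih dp (a - 1) b c (by split_ifs at hm ⊢ <;> omega) hInv
            have h2 := ih (wGo n dp (a - 1) b c).2 (a - 1) (b - 1) c
              (by split_ifs at hm ⊢ <;> omega) h1.2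
            have h3 := ih (wGo n (wGo n dp (a - 1) b c).2 (a - 1) (b - 1) c).2 (a - 1) b (c - 1)
              (by split_ifs at hm ⊢ <;> omega) h2.2
            have h4 := ih (wGo n (wGo n (wGo n dp (a - 1) b c).2 (a - 1) (b - 1) c).2
              (a - 1) b (c - 1)).2 (a - 1) (b - 1) (c - 1)
              (by split_ifs at hm ⊢ <;> omega) h3.2
            have hv : (wGo n dp (a - 1) b c).1
                + (wGo n (wGo n dp (a - 1) b c).2 (a - 1) (b - 1) c).1
                + (wGo n (wGo n (wGo n dp (a - 1) b c).2 (a - 1) (b - 1) c).2 (a - 1) b (c - 1)).1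
                - (wGo n (wGo n (wGo n (wGo n dp (a - 1) b c).2 (a - 1) (b - 1) c).2
                    (a - 1) b (c - 1)).2 (a - 1) (b - 1) (c - 1)).1
                = WI a b c := by
              rw [h1.1, h2.1, h3.1, h4.1, WI_branch2 a b c hz h20 hlt]
            refine ⟨hv, ?_⟩
            intro k' hk'
            by_cases hkk : k' = (a.toNat, b.toNat, c.toNat)
            · simp only [hkk, if_true] at hk' ⊢
              rw [hv, WI_interior a b c hz h20]
            · simp only [if_neg hkk] at hk' ⊢
              exact h4.2 k' hk'

-- ===== VERDICT (by name: the statement is the Claim_ definition above) =====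
theorem w_spec : Claim_equal_w := by
  intro a b c _
  unfold Spec_w
  have h := wGo_ok 62 (fun _ => 0) a b c (by split_ifs <;> omega)
    (by intro k hk; exact absurd rfl hk)
  rw [w, h.1]
  by_cases h1 : a ≤ 0 ∨ b ≤ 0 ∨ c ≤ 0
  · rw [WI, if_pos h1, w_alt, if_pos h1]
  · by_cases h2 : 20 < a ∨ 20 < b ∨ 20 < c
    · rw [WI, if_neg h1, if_pos h2, w_alt, if_neg h1, if_pos h2,
        get3_wTable 20 20 20 (by omega) (by omega) (by omega)]
    · rw [WI_interior a b c h1 h2, w_alt, if_neg h1, if_neg h2,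
        get3_wTable a.toNat b.toNat c.toNat (by omega) (by omega) (by omega)]
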